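-- pv_equiv track=rewrite | github.com/CustomDesignBuildStudios/algo-99-bottles-py | bottles.py | bottle_song_func_loop
-- ===== SOURCE A (Python) =====
-- def bottle_song_func_loop(bottle_song, orginial_bottles, current_bottles):
-- 	"""
-- 	Returns a string with the # of bottles of beer on the wall song using function calls
-- 	Arguments:
-- 	battle_song  - string - The song we have so far. Function keeps adding to string until num_bottles is zero.
-- 	num_bottles  - int    - Number of bottles the song is currently on.
-- 	"""
-- 	if current_bottles > 0:
-- 		bottle_song += f"{current_bottles} bottles of beer on the wall, {current_bottles} bottles of beer. Take one down and pass it around, {current_bottles-1 if current_bottles > 1 else 'No more'} {'bottles' if current_bottles > 2 else 'bottle' } of beer on the wall.\n"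
-- 		current_bottles -= 1
--
-- 		return bottle_song_func_loop(bottle_song, orginial_bottles, current_bottles)
-- 	else:
-- 		bottle_song += f"No more bottles of beer on the wall, no more bottles of beer.\nGo to the store and buy some more, {orginial_bottles} bottles of beer on the wall."
-- 		return bottle_song
-- ===== SOURCE B (Python) =====
-- def bottle_song_func_loop(bottle_song, orginial_bottles, current_bottles):
--     """Iterative rewrite: collect each verse in a list with a countdown loop, then join once."""
--     verses = []
--     c = current_bottles
--     while c > 0:
--         verses.append(f"{c} bottles of beer on the wall, {c} bottles of beer. Take one down and pass it around, {c-1 if c > 1 else 'No more'} {'bottles' if c > 2 else 'bottle'} of beer on the wall.\n")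
--         c -= 1
--     verses.append(f"No more bottles of beer on the wall, no more bottles of beer.\nGo to the store and buy some more, {orginial_bottles} bottles of beer on the wall.")
--     return bottle_song + "".join(verses)
-- ===== Notes on version B (the rewrite author's own statement) =====
-- stated objective: idiomatic
-- what changed: Replaces the tail recursion that threads a growing accumulator string through every call with an explicit countdown while-loop that collects the verses in a list and joins them once at the end.
import Mathlib
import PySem

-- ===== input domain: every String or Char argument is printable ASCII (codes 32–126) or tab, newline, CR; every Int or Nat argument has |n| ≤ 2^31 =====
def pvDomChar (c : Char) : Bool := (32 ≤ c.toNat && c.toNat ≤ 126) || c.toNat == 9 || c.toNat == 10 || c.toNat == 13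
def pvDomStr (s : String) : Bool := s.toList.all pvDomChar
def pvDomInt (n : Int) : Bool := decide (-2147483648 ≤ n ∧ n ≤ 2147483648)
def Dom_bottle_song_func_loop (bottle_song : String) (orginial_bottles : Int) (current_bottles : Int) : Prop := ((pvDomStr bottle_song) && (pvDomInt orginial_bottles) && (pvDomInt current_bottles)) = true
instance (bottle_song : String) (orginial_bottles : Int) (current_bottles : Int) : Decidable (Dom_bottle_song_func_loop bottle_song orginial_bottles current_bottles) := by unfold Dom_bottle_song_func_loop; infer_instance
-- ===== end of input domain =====

-- B replaces A's accumulator-threading tail recursion by a countdown loop that collects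
-- the verses in a list and joins them once (idiomatic; return value identical).

-- ===== PORT A =====
-- Literal transliteration of A: recursion on current_bottles, accumulator string grows each call.
def bottle_song_func_loop (bottle_song : String) (orginial_bottles : Int) (current_bottles : Int) : String :=
  if 0 < current_bottles then
    bottle_song_func_loop
      (bottle_song ++ PySem.Int.toStr current_bottles ++ " bottles of beer on the wall, " ++
        PySem.Int.toStr current_bottles ++ " bottles of beer. Take one down and pass it around, " ++
        (if 1 < current_bottles then PySem.Int.toStr (current_bottles - 1) else "No more") ++ " " ++
        (if 2 < current_bottles then "bottles" else "bottle") ++ " of beer on the wall.\n")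
      orginial_bottles (current_bottles - 1)
  else
    bottle_song ++ "No more bottles of beer on the wall, no more bottles of beer.\nGo to the store and buy some more, " ++
      PySem.Int.toStr orginial_bottles ++ " bottles of beer on the wall."
termination_by current_bottles.toNat
decreasing_by omega

-- ===== PORT B =====
-- Source B's verse f-string built for one count c
def pvVerse (c : Int) : String :=
  PySem.Int.toStr c ++ " bottles of beer on the wall, " ++
    PySem.Int.toStr c ++ " bottles of beer. Take one down and pass it around, " ++
    (if 1 < c then PySem.Int.toStr (c - 1) else "No more") ++ " " ++
    (if 2 < c then "bottles" else "bottle") ++ " of beer on the wall.\n"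

-- Source B's while-loop: list of verses counted down from c to 1
def pvVerses (c : Int) : List String :=
  if 0 < c then pvVerse c :: pvVerses (c - 1) else []
termination_by c.toNat
decreasing_by omega

def bottle_song_func_loop_alt (bottle_song : String) (orginial_bottles : Int) (current_bottles : Int) : String :=
  bottle_song ++ PySem.Str.join ""
    (pvVerses current_bottles ++
      ["No more bottles of beer on the wall, no more bottles of beer.\nGo to the store and buy some more, " ++
        PySem.Int.toStr orginial_bottles ++ " bottles of beer on the wall."])

-- ===== PRECONDITION & SPEC =====
def Spec_bottle_song_func_loop (bottle_song : String) (orginial_bottles : Int) (current_bottles : Int) (out : String) : Prop := out = bottle_song_func_loop_alt bottle_song orginial_bottles current_bottles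
instance (bottle_song : String) (orginial_bottles : Int) (current_bottles : Int) (out : String) : Decidable (Spec_bottle_song_func_loop bottle_song orginial_bottles current_bottles out) := by unfold Spec_bottle_song_func_loop; infer_instance

-- ===== CLAIM (what is proved, stated in full; the proofs are below) =====
def Claim_equal_bottle_song_func_loop : Prop := ∀ (bottle_song : String) (orginial_bottles : Int) (current_bottles : Int), Dom_bottle_song_func_loop bottle_song orginial_bottles current_bottles → Spec_bottle_song_func_loop bottle_song orginial_bottles current_bottles (bottle_song_func_loop bottle_song orginial_bottles current_bottles)

-- ===== LEMMAS AND PROOFS =====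
theorem pv_join_empty_cons (a : String) (l : List String) :
    PySem.Str.join "" (a :: l) = a ++ PySem.Str.join "" l := by
  rw [← String.toList_inj]
  simp [PySem.Str.join, PySem.Chars.join, List.intercalate]
  cases l <;> simp

theorem pv_main (orginial_bottles : Int) (current_bottles : Int) :
    ∀ bottle_song : String,
      bottle_song_func_loop bottle_song orginial_bottles current_bottles =
        bottle_song_func_loop_alt bottle_song orginial_bottles current_bottles := by
  generalize hn : current_bottles.toNat = n
  induction n generalizing current_bottles with
  | zero =>
    intro s
    have hc : ¬ 0 < current_bottles := by omega
    rw [bottle_song_func_loop, bottle_song_func_loop_alt, pvVerses]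
    simp only [hc, if_neg, not_false_iff, List.nil_append, pv_join_empty_cons]
    simp [PySem.Str.join, PySem.Chars.join, List.intercalate, String.append_assoc]
  | succ n ih =>
    intro s
    have hc : 0 < current_bottles := by omega
    rw [bottle_song_func_loop]
    simp only [hc, if_pos]
    rw [ih (current_bottles - 1) (by omega)]
    have hexp : pvVerses current_bottles = pvVerse current_bottles :: pvVerses (current_bottles - 1) := by
      rw [pvVerses]; simp [hc]
    rw [bottle_song_func_loop_alt, bottle_song_func_loop_alt, hexp, List.cons_append,
      pv_join_empty_cons, pvVerse]
    simp [String.append_assoc]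

-- ===== VERDICT (by name: the statement is the Claim_ definition above) =====
theorem bottle_song_func_loop_spec : Claim_equal_bottle_song_func_loop := by
  intro s o c _
  exact pv_main o c s
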